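-- pv_equiv track=rewrite | github.com/nster98/PicrossGame | gamePicross/PicrossTools.py | getHintsHorizontal
-- ===== SOURCE A (Python) =====
-- def getHintsHorizontal(board, i):
--
--     hintsArr = []
--     count = 0
--
--     for j in range(len(board[i])):
--         if (board[i][j] != -1):
--             count += 1
--         elif (count != 0):
--             hintsArr.append(count)
--             count = 0
--
--     if (count != 0):
--         hintsArr.append(count)
--
--     return hintsArr
-- ===== SOURCE B (Python) =====
-- def getHintsHorizontal(board, i):
--     row = board[i]
--     seps = [-1] + [j for j, v in enumerate(row) if v == -1] + [len(row)]
--     return [b - a - 1 for a, b in zip(seps, seps[1:]) if b - a - 1 > 0]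
-- ===== Notes on version B (the rewrite author's own statement) =====
-- stated objective: alternative
-- what changed: Instead of scanning with a running counter flushed at each -1 and at the end, B collects the index positions of the -1 separator cells, brackets them with virtual separators at -1 and len(row), and returns the positive gaps between consecutive separator positions.
import Mathlib
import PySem

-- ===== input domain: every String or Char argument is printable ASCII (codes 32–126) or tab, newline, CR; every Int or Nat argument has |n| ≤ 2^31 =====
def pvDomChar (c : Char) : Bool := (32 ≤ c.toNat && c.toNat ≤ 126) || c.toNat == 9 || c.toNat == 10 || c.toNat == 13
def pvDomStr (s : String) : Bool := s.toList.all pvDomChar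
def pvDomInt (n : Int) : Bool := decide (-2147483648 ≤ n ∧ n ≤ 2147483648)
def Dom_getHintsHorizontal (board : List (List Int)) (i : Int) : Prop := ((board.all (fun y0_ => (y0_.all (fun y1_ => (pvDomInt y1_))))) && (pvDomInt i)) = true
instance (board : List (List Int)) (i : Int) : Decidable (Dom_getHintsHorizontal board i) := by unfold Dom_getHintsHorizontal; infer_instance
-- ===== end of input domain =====

-- B replaces A's counter-and-flush scan by separator-position arithmetic: it collects the
-- indices of the -1 cells, brackets them with virtual separators -1 and len(row), and returns
-- the positive gaps between consecutive separators (objective: alternative algorithm).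

-- ===== PORT A =====
-- count-and-flush loop over j in range(len(board[i])), literal transliteration
def getHintsHorizontal (board : List (List Int)) (i : Int) : List Int :=
  match PySem.List.pyGet? board i with
  | none => []        -- Python raises IndexError here; excluded by Pre_
  | some row =>
    let st := (PySem.List.pyRange 0 (row.length : Int) 1).foldl
      (fun (p : List Int × Int) j =>
        if PySem.List.pyGetD row j 0 ≠ -1 then (p.1, p.2 + 1)
        else if p.2 ≠ 0 then (p.1 ++ [p.2], 0) else p)
      ([], 0)
    if st.2 ≠ 0 then st.1 ++ [st.2] else st.1

-- ===== PORT B =====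
-- seps = [-1] + [j for j, v in enumerate(row) if v == -1] + [len(row)];
-- result = [b - a - 1 for a, b in zip(seps, seps[1:]) if b - a - 1 > 0]
def getHintsHorizontal_alt (board : List (List Int)) (i : Int) : List Int :=
  match PySem.List.pyGet? board i with
  | none => []        -- Python raises IndexError here; excluded by Pre_
  | some row =>
    let seps : List Int :=
      [-1] ++ ((PySem.List.enumerate row 0).filter (fun p => p.2 == -1)).map (fun p => p.1)
           ++ [(row.length : Int)]
    (seps.zip (PySem.List.slice seps (some 1) none)).filterMap
      (fun p => if 0 < p.2 - p.1 - 1 then some (p.2 - p.1 - 1) else none)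

-- ===== PRECONDITION & SPEC =====
-- Pre_ excludes exactly the inputs where board[i] raises IndexError (i outside -len..len-1); B raises there too.
def Pre_getHintsHorizontal (board : List (List Int)) (i : Int) : Prop :=
  (PySem.List.pyGet? board i).isSome = true
instance (board : List (List Int)) (i : Int) : Decidable (Pre_getHintsHorizontal board i) := by
  unfold Pre_getHintsHorizontal; infer_instance

def pvWitness_getHintsHorizontal : List (List Int) × Int := ([[1, -1, 2, 2]], 0)

def Spec_getHintsHorizontal (board : List (List Int)) (i : Int) (out : List Int) : Prop := out = getHintsHorizontal_alt board i
instance (board : List (List Int)) (i : Int) (out : List Int) : Decidable (Spec_getHintsHorizontal board i out) := by unfold Spec_getHintsHorizontal; infer_instance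

-- ===== CLAIM (what is proved, stated in full; the proofs are below) =====
def Claim_equal_getHintsHorizontal : Prop := ∀ (board : List (List Int)) (i : Int), Dom_getHintsHorizontal board i → Pre_getHintsHorizontal board i → Spec_getHintsHorizontal board i (getHintsHorizontal board i)

-- ===== LEMMAS AND PROOFS =====

-- A's loop step, named for the proofs
def pvStepA (p : List Int × Int) (v : Int) : List Int × Int :=
  if v ≠ -1 then (p.1, p.2 + 1)
  else if p.2 ≠ 0 then (p.1 ++ [p.2], 0) else p

def pvFlush (p : List Int × Int) : List Int :=
  if p.2 ≠ 0 then p.1 ++ [p.2] else p.1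

-- run lengths of the maximal blocks of non -1 cells (the common reference value)
def pvRunsB : List Int → List Int
  | [] => []
  | x :: xs =>
    if x = -1 then pvRunsB xs
    else (((xs.takeWhile (· ≠ -1)).length + 1 : Nat) : Int) :: pvRunsB (xs.dropWhile (· ≠ -1))
termination_by l => l.length
decreasing_by
  · simp
  · exact Nat.lt_succ_of_le (List.length_dropWhile_le _ _)

-- reference value with c filled cells pending since the last separator
def pvPend (c : Int) (row : List Int) : List Int :=
  if c = 0 then pvRunsB row
  else (c + ((row.takeWhile (· ≠ -1)).length : Int)) :: pvRunsB (row.dropWhile (· ≠ -1))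

-- the positive gaps between consecutive entries of a separator list
def pvGaps (s : List Int) : List Int :=
  (s.zip s.tail).filterMap (fun p => if 0 < p.2 - p.1 - 1 then some (p.2 - p.1 - 1) else none)

theorem pvGaps_cons_cons (a b : Int) (t : List Int) :
    pvGaps (a :: b :: t) = (if 0 < b - a - 1 then [b - a - 1] else []) ++ pvGaps (b :: t) := by
  simp only [pvGaps, List.tail_cons, List.zip_cons_cons, List.filterMap_cons]
  split_ifs <;> simp

theorem pvFoldA_eq_pend : ∀ (row : List Int) (acc : List Int) (c : Int), 0 ≤ c →
    pvFlush (row.foldl pvStepA (acc, c)) = acc ++ pvPend c row := by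
  intro row
  induction row with
  | nil =>
    intro acc c _
    simp [pvFlush, pvPend, pvRunsB]
    split_ifs <;> simp_all
  | cons x xs ih =>
    intro acc c hc
    by_cases hx : x = -1
    · subst hx
      by_cases hc0 : c = 0
      · subst hc0
        simp only [List.foldl_cons, pvStepA]
        norm_num
        rw [ih acc 0 le_rfl]
        simp [pvPend, pvRunsB]
      · simp only [List.foldl_cons, pvStepA]
        norm_num [hc0]
        rw [ih (acc ++ [c]) 0 le_rfl]
        simp [pvPend, hc0, pvRunsB, List.dropWhile, List.takeWhile]
    · simp only [List.foldl_cons, pvStepA, if_pos (by simpa using hx)]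
      rw [ih acc (c + 1) (by omega)]
      by_cases hc0 : c = 0
      · subst hc0
        simp [pvPend, pvRunsB, hx]
        omega
      · simp [pvPend, hc0, show c + 1 ≠ 0 by omega, List.takeWhile, List.dropWhile, hx]
        omega

theorem pvA_row (row : List Int) :
    pvFlush (((PySem.List.pyRange 0 (row.length : Int) 1).foldl
      (fun (p : List Int × Int) j =>
        if PySem.List.pyGetD row j 0 ≠ -1 then (p.1, p.2 + 1)
        else if p.2 ≠ 0 then (p.1 ++ [p.2], 0) else p)
      ([], 0))) = pvPend 0 row := by
  have h := PySem.List.foldl_pyRange_pyGetD (f := pvStepA) (xs := row) (a := 0)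
      (d := 0) (init := (([] : List Int), (0 : Int))) le_rfl
  simp only [pvStepA, PySem.List.len] at h
  rw [h]
  have := pvFoldA_eq_pend row [] 0 le_rfl
  simpa [pvStepA] using this

-- B's separator gaps, generalized: last separator at a, c filled cells seen since it,
-- and the enumeration of the remaining cells starting at index s = a + 1 + c
theorem pvGaps_pair (a b : Int) : pvGaps [a, b] = if 0 < b - a - 1 then [b - a - 1] else [] := by
  by_cases h : (1 : Int) < b - a <;> simp [pvGaps, h]

theorem pvB_main : ∀ (xs : List Int) (a c s : Int), 0 ≤ c → s = a + 1 + c →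
    pvGaps (a :: (((PySem.List.enumerate xs s).filter (fun p => p.2 == -1)).map (fun p => p.1)
              ++ [s + (xs.length : Int)])) = pvPend c xs := by
  intro xs
  induction xs with
  | nil =>
    intro a c s hc hs
    subst hs
    simp only [PySem.List.enumerate_nil, List.filter_nil, List.map_nil, List.nil_append,
      List.length_nil, Nat.cast_zero, add_zero]
    rw [pvGaps_pair, show a + 1 + c - a - 1 = c by ring]
    by_cases hc0 : c = 0
    · simp [hc0, pvPend, pvRunsB]
    · rw [if_pos (by omega)]
      simp [pvPend, hc0, pvRunsB]
  | cons x xs ih =>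
    intro a c s hc hs
    by_cases hx : x = -1
    · subst hx
      rw [show PySem.List.enumerate (-1 :: xs) s = (s, -1) :: PySem.List.enumerate xs (s + 1) from PySem.List.enumerate_cons ..]
      simp only [List.filter_cons, beq_self_eq_true, if_true, List.map_cons, List.cons_append,
        List.length_cons]
      rw [show s + (((xs.length : Nat) + 1 : Nat) : Int) = (s + 1) + (xs.length : Int) by push_cast; ring]
      rw [pvGaps_cons_cons]
      simp only [ih s 0 (s + 1) le_rfl (by ring)]
      subst hs
      rw [show a + 1 + c - a - 1 = c by ring]
      by_cases hc0 : c = 0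
      · simp [hc0, pvPend, pvRunsB]
      · rw [if_pos (by omega)]
        simp [pvPend, hc0, List.takeWhile, List.dropWhile, pvRunsB]
    · rw [show PySem.List.enumerate (x :: xs) s = (s, x) :: PySem.List.enumerate xs (s + 1) from PySem.List.enumerate_cons ..]
      simp only [List.filter_cons, show (x == -1) = false by simpa using hx,
        Bool.false_eq_true, if_false, List.length_cons]
      rw [show s + (((xs.length : Nat) + 1 : Nat) : Int) = (s + 1) + (xs.length : Int) by push_cast; ring]
      simp only [ih a (c + 1) (s + 1) (by omega) (by omega)]
      by_cases hc0 : c = 0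
      · subst hc0
        simp [pvPend, pvRunsB, hx]
        omega
      · simp [pvPend, hc0, show c + 1 ≠ 0 by omega, List.takeWhile, List.dropWhile, hx]
        omega

-- ===== VERDICT (by name: the statement is the Claim_ definition above) =====
theorem getHintsHorizontal_spec : Claim_equal_getHintsHorizontal := by
  intro board i _ hpre
  unfold Spec_getHintsHorizontal getHintsHorizontal getHintsHorizontal_alt
  cases hrow : PySem.List.pyGet? board i with
  | none => simp [Pre_getHintsHorizontal, hrow] at hpre
  | some row =>
    simp only
    rw [PySem.List.slice_from_one]
    have hb := pvB_main row (-1) 0 0 le_rfl (by ring)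
    rw [zero_add] at hb
    have ha := pvA_row row
    calc _ = pvPend 0 row := by rw [← ha]; rfl
      _ = _ := by rw [← hb]; rfl
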